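-- pv_equiv track=rewrite | github.com/arm-on/planner-app | core/assistant_context.py | _summarize_turns
-- ===== SOURCE A (Python) =====
-- from typing import Any, Dict, List
--
-- def _summarize_turns(turns: List[Dict[str, str]], max_chars: int = 1800) -> str:
--     if not turns:
--         return ""
--
--     lines: List[str] = []
--     for item in turns:
--         role = item.get("role", "user").strip().lower()
--         content = " ".join((item.get("content") or "").split())
--         if not content:
--             continue
--         label = "U" if role == "user" else "A"
--         lines.append(f"{label}: {content[:220]}")
--         if sum(len(x) for x in lines) > max_chars:
--             break
--
--     result = "\n".join(lines)
--     return result[:max_chars]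
-- ===== SOURCE B (Python) =====
-- from typing import Any, Dict, List, Optional
--
-- def _format_line(item: Dict[str, str]) -> Optional[str]:
--     content = " ".join((item.get("content") or "").split())
--     if not content:
--         return None
--     role = item.get("role", "user").strip().lower()
--     label = "U" if role == "user" else "A"
--     return f"{label}: {content[:220]}"
--
-- def _summarize_turns(turns: List[Dict[str, str]], max_chars: int = 1800) -> str:
--     if not turns:
--         return ""
--
--     # Pass 1: format every turn with non-empty content.
--     lines = [l for l in map(_format_line, turns) if l is not None]
--
--     # Pass 2: running totals of line lengths; keep up to (and including) the
--     # first line whose running total exceeds max_chars.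
--     totals: List[int] = []
--     t = 0
--     for n in map(len, lines):
--         t += n
--         totals.append(t)
--     cut = next((i for i, tt in enumerate(totals) if tt > max_chars), None)
--     kept = lines if cut is None else lines[: cut + 1]
--     return "\n".join(kept)[:max_chars]
-- ===== Notes on version B (the rewrite author's own statement) =====
-- stated objective: alternative
-- what changed: B decouples formatting from capping: one pass builds all formatted lines, a second pass finds the first running-total of line lengths exceeding max_chars and keeps lines up to and including it, instead of A's single loop that re-sums every collected line after each append and breaks; B avoids A's quadratic re-summation but formats all turns where A stops early.
import Mathlib
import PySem

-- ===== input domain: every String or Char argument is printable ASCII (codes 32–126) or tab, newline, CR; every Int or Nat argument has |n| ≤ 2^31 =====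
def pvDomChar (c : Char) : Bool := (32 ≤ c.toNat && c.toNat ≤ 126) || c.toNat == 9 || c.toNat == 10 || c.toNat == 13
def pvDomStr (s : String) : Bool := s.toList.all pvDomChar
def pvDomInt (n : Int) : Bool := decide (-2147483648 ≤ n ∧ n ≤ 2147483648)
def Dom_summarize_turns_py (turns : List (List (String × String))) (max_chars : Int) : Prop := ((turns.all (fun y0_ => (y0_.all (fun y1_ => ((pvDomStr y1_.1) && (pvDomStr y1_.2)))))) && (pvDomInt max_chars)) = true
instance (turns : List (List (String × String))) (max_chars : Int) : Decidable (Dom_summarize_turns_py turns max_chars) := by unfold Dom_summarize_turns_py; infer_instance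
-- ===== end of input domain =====

-- B builds all formatted lines in one pass and then cuts at the first running total of
-- line lengths exceeding max_chars (two decoupled passes), instead of A's single loop
-- that re-sums every collected line after each append; the return value is proved equal.

-- ===== PORT A =====
-- A's loop body up to the append: role/content/label; `continue` on empty content is `none`.
def pvALine? (item : List (String × String)) : Option String :=
  let role := PySem.Str.lower (PySem.Str.strip (PySem.Dict.getD (PySem.Dict.mk item) "role" "user"))
  let content := PySem.Str.join " " (PySem.Str.split₀ (PySem.Dict.getD (PySem.Dict.mk item) "content" ""))
  if content = "" then none
  else
    let label := if role = "user" then "U" else "A"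
    some (label ++ ": " ++ PySem.Str.slice content none (some 220))

-- A's for-loop with its early break: `lines` is the accumulator; after appending,
-- A re-sums sum(len(x) for x in lines) and breaks (stops recursing) once it exceeds max_chars.
def pvALoop (max_chars : Int) : List (List (String × String)) → List String → List String
  | [], lines => lines
  | item :: rest, lines =>
    match pvALine? item with
    | none => pvALoop max_chars rest lines
    | some l =>
      let lines' := lines ++ [l]
      if (lines'.map PySem.Str.len).sum > max_chars then lines'
      else pvALoop max_chars rest lines'

def summarize_turns_py (turns : List (List (String × String))) (max_chars : Int) : String :=
  if turns = [] then ""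
  else PySem.Str.slice (PySem.Str.join "\n" (pvALoop max_chars turns [])) none (some max_chars)

-- ===== PORT B =====
-- Source B's _format_line (note: content is tested first, role computed only when needed).
def pvBLine? (item : List (String × String)) : Option String :=
  let content := PySem.Str.join " " (PySem.Str.split₀ (PySem.Dict.getD (PySem.Dict.mk item) "content" ""))
  if content = "" then none
  else
    let role := PySem.Str.lower (PySem.Str.strip (PySem.Dict.getD (PySem.Dict.mk item) "role" "user"))
    let label := if role = "user" then "U" else "A"
    some (label ++ ": " ++ PySem.Str.slice content none (some 220))

-- Source B pass 1: [l for l in map(_format_line, turns) if l is not None]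
def pvBLines : List (List (String × String)) → List String
  | [] => []
  | item :: rest =>
    match pvBLine? item with
    | none => pvBLines rest
    | some l => l :: pvBLines rest

-- Source B pass 2: the running totals of the line lengths.
def pvBTotals (t : Int) : List String → List Int
  | [] => []
  | l :: ls => (t + PySem.Str.len l) :: pvBTotals (t + PySem.Str.len l) ls

def summarize_turns_py_alt (turns : List (List (String × String))) (max_chars : Int) : String :=
  if turns = [] then ""
  else
    let lines := pvBLines turns
    let kept := match (pvBTotals 0 lines).findIdx? (fun tt => tt > max_chars) with
      | none => lines
      | some i => lines.take (i + 1)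
    PySem.Str.slice (PySem.Str.join "\n" kept) none (some max_chars)

-- ===== PRECONDITION & SPEC =====
def Spec_summarize_turns_py (turns : List (List (String × String))) (max_chars : Int) (out : String) : Prop := out = summarize_turns_py_alt turns max_chars
instance (turns : List (List (String × String))) (max_chars : Int) (out : String) : Decidable (Spec_summarize_turns_py turns max_chars out) := by unfold Spec_summarize_turns_py; infer_instance

-- ===== CLAIM (what is proved, stated in full; the proofs are below) =====
def Claim_equal_summarize_turns_py : Prop := ∀ (turns : List (List (String × String))) (max_chars : Int), Dom_summarize_turns_py turns max_chars → Spec_summarize_turns_py turns max_chars (summarize_turns_py turns max_chars)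

-- ===== LEMMAS AND PROOFS =====

-- The two line formatters compute the same option (same expressions, different let order).
theorem pvLine?_eq (item : List (String × String)) : pvBLine? item = pvALine? item := rfl

-- Reference "cut" of a line list: keep lines while the running total (started at t)
-- stays ≤ mc, and include the first line that tips it over.
def pvCut (mc : Int) (t : Int) : List String → List String
  | [] => []
  | l :: ls => if t + PySem.Str.len l > mc then [l] else l :: pvCut mc (t + PySem.Str.len l) ls

-- B's take-at-first-excessive-total equals the reference cut.
theorem pvBTake_eq_cut (mc : Int) : ∀ (ls : List String) (t : Int),
    (match (pvBTotals t ls).findIdx? (fun tt => tt > mc) with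
      | none => ls
      | some i => ls.take (i + 1)) = pvCut mc t ls := by
  intro ls
  induction ls with
  | nil => intro t; simp [pvBTotals, pvCut]
  | cons l ls ih =>
    intro t
    simp only [pvBTotals, pvCut, List.findIdx?_cons]
    by_cases h : t + PySem.Str.len l > mc
    · simp only [decide_eq_true h, if_pos h]
      simp
    · simp only [decide_eq_false h, if_neg h]
      rw [← ih (t + PySem.Str.len l)]
      cases hfi : List.findIdx? (fun tt => tt > mc) (pvBTotals (t + PySem.Str.len l) ls) with
      | none => simp
      | some i => simp [List.take_succ_cons]

-- A's loop, started from any accumulator, appends exactly the reference cut of the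
-- remaining formatted lines, with the running total seeded by the accumulator's lengths.
theorem pvALoop_eq (mc : Int) : ∀ (rest : List (List (String × String))) (acc : List String),
    pvALoop mc rest acc = acc ++ pvCut mc ((acc.map PySem.Str.len).sum) (pvBLines rest) := by
  intro rest
  induction rest with
  | nil => intro acc; simp [pvALoop, pvBLines, pvCut]
  | cons item rest ih =>
    intro acc
    simp only [pvALoop, pvBLines, pvLine?_eq]
    cases h : pvALine? item with
    | none => exact ih acc
    | some l =>
      simp only [pvCut]
      have hsum : ((acc ++ [l]).map PySem.Str.len).sum = (acc.map PySem.Str.len).sum + PySem.Str.len l := by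
        simp
      by_cases hgt : (acc.map PySem.Str.len).sum + PySem.Str.len l > mc
      · rw [if_pos (by rw [hsum]; exact hgt), if_pos hgt]
      · rw [if_neg (by rw [hsum]; exact hgt), if_neg hgt, ih (acc ++ [l]), hsum,
          List.append_assoc, List.singleton_append]

-- ===== VERDICT (by name: the statement is the Claim_ definition above) =====
theorem summarize_turns_py_spec : Claim_equal_summarize_turns_py := by
  intro turns max_chars _
  unfold Spec_summarize_turns_py summarize_turns_py summarize_turns_py_alt
  by_cases h : turns = []
  · simp [h]
  · simp only [if_neg h]
    rw [pvALoop_eq max_chars turns [], pvBTake_eq_cut max_chars]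
    simp
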